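-- pv_equiv track=rewrite | github.com/lastmile-ai/mcp-eval | src/mcp_eval/evaluators/builtin.py | _count_backtracking
-- ===== SOURCE A (Python) =====
-- from typing import Any, Dict, List, Literal, Optional, Union, Pattern, Tuple
--
-- def _count_backtracking(sequence: List[str]) -> int:
--     """Count times agent went back to previous tools."""
--     if len(sequence) < 2:
--         return 0
--
--     backtrack_count = 0
--     seen_tools = set()
--     tool_last_index = {}
--
--     for i, tool in enumerate(sequence):
--         if tool in seen_tools:
--             # Check if we're going backwards
--             if i - tool_last_index[tool] > 2:  # Allow immediate retry
--                 backtrack_count += 1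
--         seen_tools.add(tool)
--         tool_last_index[tool] = i
--
--     return backtrack_count
-- ===== SOURCE B (Python) =====
-- def _count_backtracking(sequence):
--     """Count times agent went back to previous tools."""
--     groups = {}
--     for i, tool in enumerate(sequence):
--         groups.setdefault(tool, []).append(i)
--     total = 0
--     for idxs in groups.values():
--         for a, b in zip(idxs, idxs[1:]):
--             if b - a > 2:
--                 total += 1
--     return total
-- ===== Notes on version B (the rewrite author's own statement) =====
-- stated objective: alternative
-- what changed: A makes one sequential pass keeping a seen-set and a last-occurrence-index dict and testing the gap at each repeat; B first groups all occurrence indices per tool into a dict and then counts, per tool, the consecutive index pairs whose gap exceeds 2.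
import Mathlib
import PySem

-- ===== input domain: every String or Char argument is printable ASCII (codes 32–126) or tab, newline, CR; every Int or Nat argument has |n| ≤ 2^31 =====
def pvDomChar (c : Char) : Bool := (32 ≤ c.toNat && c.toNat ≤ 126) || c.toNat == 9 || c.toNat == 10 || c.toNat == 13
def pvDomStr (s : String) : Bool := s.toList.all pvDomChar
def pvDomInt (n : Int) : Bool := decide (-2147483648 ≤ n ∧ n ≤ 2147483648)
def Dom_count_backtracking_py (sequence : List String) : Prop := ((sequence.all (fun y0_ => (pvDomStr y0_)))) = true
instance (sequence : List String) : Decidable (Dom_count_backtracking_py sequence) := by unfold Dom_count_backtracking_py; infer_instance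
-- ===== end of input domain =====

-- B changes the decomposition: instead of A's one sequential pass with a seen-set and a
-- last-index dict, B iterates over the distinct tools and counts, per tool, the consecutive
-- occurrence pairs whose index gap exceeds 2 (objective: alternative decomposition, same result).

-- ===== PORT A =====
-- one loop step of A's 'for i, tool in enumerate(sequence)' body over the state
-- (backtrack_count, seen_tools, tool_last_index); tool_last_index[tool] is only read
-- under 'tool in seen_tools', where get? is some, so '.getD 0' is exact there
def pvStepA (st : Int × PySem.Set String × PySem.Dict String Int) (p : Int × String) :
    Int × PySem.Set String × PySem.Dict String Int :=
  (if st.2.1.contains p.2 then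
     if p.1 - ((st.2.2.get? p.2).getD 0) > 2 then st.1 + 1 else st.1
   else st.1,
   st.2.1.add p.2, st.2.2.insert p.2 p.1)

def count_backtracking_py (sequence : List String) : Int :=
  if sequence.length < 2 then 0
  else ((PySem.List.enumerate sequence 0).foldl pvStepA
          (0, PySem.Set.empty, PySem.Dict.empty)).1

-- ===== PORT B =====
-- groups.setdefault(tool, []).append(i)  — one grouping step of B's first loop
def pvStepB (g : PySem.Dict String (List Int)) (p : Int × String) : PySem.Dict String (List Int) :=
  g.modify p.2 [] (fun l => l ++ [p.1])

-- body of 'for a, b in zip(idxs, idxs[1:]): if b - a > 2: total += 1'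
def pvPairStep (total : Int) (q : Int × Int) : Int :=
  if q.2 - q.1 > 2 then total + 1 else total

-- idxs[1:] on a list is exactly idxs.drop 1; groups.values() is Dict.values (insertion order)
def count_backtracking_py_alt (sequence : List String) : Int :=
  let groups := (PySem.List.enumerate sequence 0).foldl pvStepB PySem.Dict.empty
  groups.values.foldl
    (fun total idxs => (idxs.zip (idxs.drop 1)).foldl pvPairStep total) 0

-- ===== PRECONDITION & SPEC =====
def Spec_count_backtracking_py (sequence : List String) (out : Int) : Prop := out = count_backtracking_py_alt sequence
instance (sequence : List String) (out : Int) : Decidable (Spec_count_backtracking_py sequence out) := by unfold Spec_count_backtracking_py; infer_instance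

-- ===== CLAIM (what is proved, stated in full; the proofs are below) =====
def Claim_equal_count_backtracking_py : Prop := ∀ (sequence : List String), Dom_count_backtracking_py sequence → Spec_count_backtracking_py sequence (count_backtracking_py sequence)

-- ===== LEMMAS AND PROOFS =====

-- the occurrence indices of a tool (B's groups dict maps each tool to this list)
def pvIdxs (sequence : List String) (tool : String) : List Int :=
  ((PySem.List.enumerate sequence 0).filter (fun p => p.2 == tool)).map (fun p => p.1)

-- number of adjacent pairs with gap > 2, structurally
def adjC : List Int → Int
  | a :: b :: r => (if b - a > 2 then 1 else 0) + adjC (b :: r)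
  | _ => 0

theorem zipfold_eq_adjC (l : List Int) : ∀ t : Int,
    (l.zip (l.drop 1)).foldl pvPairStep t = t + adjC l := by
  induction l with
  | nil => intro t; simp [adjC]
  | cons a r ih =>
    cases r with
    | nil => intro t; simp [adjC]
    | cons b r' =>
      intro t
      have h := ih (pvPairStep t (a, b))
      simp only [List.drop_succ_cons, List.drop_zero, List.zip_cons_cons, List.foldl_cons] at *
      rw [h, adjC, pvPairStep]
      split <;> ring

theorem adjC_append (l : List Int) (n : Int) :
    adjC (l ++ [n]) = adjC l +
      (match l.getLast? with
       | some j => if n - j > 2 then 1 else 0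
       | none => 0) := by
  induction l with
  | nil => simp [adjC]
  | cons a r ih =>
    cases r with
    | nil => simp [adjC]
    | cons b r' =>
      simp only [List.cons_append, List.getLast?_cons_cons] at *
      rw [adjC, adjC, ih]
      ring

theorem pvIdxs_nil_iff (xs : List String) (x : String) :
    pvIdxs xs x = [] ↔ x ∉ xs := by
  unfold pvIdxs
  rw [List.map_eq_nil_iff, List.filter_eq_nil_iff]
  constructor
  · intro h hx
    have : x ∈ (PySem.List.enumerate xs 0).map (fun p => p.2) := by
      rw [PySem.List.map_snd_enumerate]; exact hx
    rcases List.mem_map.mp this with ⟨p, hp, hpx⟩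
    exact absurd (by simp [hpx]) (h p hp)
  · intro hx p hp
    simp only [beq_iff_eq, decide_eq_true_eq]
    intro hpx
    apply hx
    have : p.2 ∈ (PySem.List.enumerate xs 0).map (fun p => p.2) := List.mem_map_of_mem hp
    rw [PySem.List.map_snd_enumerate] at this
    exact hpx ▸ this

theorem pvIdxs_append (xs : List String) (x t : String) :
    pvIdxs (xs ++ [x]) t = pvIdxs xs t ++ (if x = t then [(xs.length : Int)] else []) := by
  unfold pvIdxs
  rw [PySem.List.enumerate_append, List.filter_append, List.map_append]
  congr 1
  rw [PySem.List.enumerate_cons, PySem.List.enumerate_nil]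
  by_cases h : x = t <;> simp [h]

theorem sum_map_update (l : List String) (x : String) (f f' : String → Int)
    (hx : x ∈ l) (hn : l.Nodup) (h : ∀ y, y ≠ x → f' y = f y) :
    (l.map f').sum = (l.map f).sum + (f' x - f x) := by
  induction l with
  | nil => cases hx
  | cons a r ih =>
    rcases List.nodup_cons.mp hn with ⟨ha, hr⟩
    by_cases hax : a = x
    · subst hax
      have : r.map f' = r.map f := by
        apply List.map_congr_left
        intro y hy
        exact h y (fun hyx => ha (hyx ▸ hy))
      simp only [List.map_cons, List.sum_cons, this]
      ring
    · have hxr : x ∈ r := by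
        rcases List.mem_cons.mp hx with h1 | h1
        · exact absurd h1.symm hax
        · exact h1
      simp only [List.map_cons, List.sum_cons, ih hxr hr, h a hax]
      ring

theorem dedup_append_singleton (xs : List String) (x : String) :
    PySem.List.dedup (xs ++ [x]) = PySem.Set.add (PySem.List.dedup xs) x := by
  simp only [PySem.List.dedup_eq_ofList, PySem.Set.ofList_eq_foldl, List.foldl_append,
    List.foldl_cons, List.foldl_nil]

-- the joint loop invariant of A's single pass, as a function of the processed prefix
theorem mainA (xs : List String) :
    (((PySem.List.enumerate xs 0).foldl pvStepA (0, PySem.Set.empty, PySem.Dict.empty)).1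
        = ((PySem.List.dedup xs).map (fun tool => adjC (pvIdxs xs tool))).sum)
    ∧ (∀ t, ((PySem.List.enumerate xs 0).foldl pvStepA
          (0, PySem.Set.empty, PySem.Dict.empty)).2.1.contains t = decide (t ∈ xs))
    ∧ (∀ t, ((PySem.List.enumerate xs 0).foldl pvStepA
          (0, PySem.Set.empty, PySem.Dict.empty)).2.2.get? t = (pvIdxs xs t).getLast?) := by
  induction xs using List.reverseRecOn with
  | nil =>
    refine ⟨by simp [PySem.List.enumerate_nil, PySem.List.dedup], fun t => by
      simp [PySem.List.enumerate_nil, PySem.Set.empty], fun t => by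
      simp [PySem.List.enumerate_nil, pvIdxs, PySem.List.enumerate_nil]⟩
  | append_singleton xs x ih =>
    obtain ⟨ih1, ih2, ih3⟩ := ih
    rw [PySem.List.enumerate_append, List.foldl_append, PySem.List.enumerate_cons,
      PySem.List.enumerate_nil] at *
    set st := (PySem.List.enumerate xs 0).foldl pvStepA (0, PySem.Set.empty, PySem.Dict.empty)
      with hst
    simp only [List.foldl_cons, List.foldl_nil]
    refine ⟨?_, ?_, ?_⟩
    · -- count component
      show (pvStepA st (0 + xs.length, x)).1 = _
      unfold pvStepA
      rw [ih2 x, ih3 x]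
      by_cases hx : x ∈ xs
      · have hdd : PySem.List.dedup (xs ++ [x]) = PySem.List.dedup xs := by
          rw [dedup_append_singleton, PySem.Set.add]
          simp [PySem.Set.contains_iff, PySem.List.mem_dedup, hx]
        have hne : pvIdxs xs x ≠ [] := fun h => (pvIdxs_nil_iff xs x).mp h hx
        obtain ⟨j, hj⟩ : ∃ j, (pvIdxs xs x).getLast? = some j := by
          cases hgl : (pvIdxs xs x).getLast? with
          | none => exact absurd (List.getLast?_eq_none_iff.mp hgl) hne
          | some j => exact ⟨j, rfl⟩
        rw [hdd]
        rw [sum_map_update (PySem.List.dedup xs) x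
          (fun tool => adjC (pvIdxs xs tool))
          (fun tool => adjC (pvIdxs (xs ++ [x]) tool))
          (by rw [PySem.List.mem_dedup]; exact hx) (PySem.List.nodup_dedup xs)
          (fun y hy => by
            show adjC (pvIdxs (xs ++ [x]) y) = adjC (pvIdxs xs y)
            rw [pvIdxs_append, if_neg (fun hh => hy hh.symm), List.append_nil])]
        rw [pvIdxs_append, if_pos rfl, adjC_append, hj]
        simp only [hx, decide_true, if_true, hj, Option.getD_some, ← ih1]
        split <;> omega
      · have hdd : PySem.List.dedup (xs ++ [x]) = PySem.List.dedup xs ++ [x] := by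
          rw [dedup_append_singleton, PySem.Set.add]
          simp [PySem.Set.contains_iff, PySem.List.mem_dedup, hx]
        have hnil : pvIdxs xs x = [] := (pvIdxs_nil_iff xs x).mpr hx
        rw [hdd, List.map_append, List.sum_append]
        have hmap : (PySem.List.dedup xs).map (fun tool => adjC (pvIdxs (xs ++ [x]) tool))
            = (PySem.List.dedup xs).map (fun tool => adjC (pvIdxs xs tool)) := by
          apply List.map_congr_left
          intro y hy
          have hyx : x ≠ y := by
            intro h
            apply hx
            have hmem := h ▸ hy
            rw [PySem.List.mem_dedup] at hmem
            exact hmem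
          rw [pvIdxs_append, if_neg hyx, List.append_nil]
        rw [hmap]
        simp only [List.map_cons, List.map_nil, List.sum_cons, List.sum_nil]
        rw [pvIdxs_append, if_pos rfl, hnil]
        simp only [hx, decide_false, Bool.false_eq_true, if_false, List.nil_append, adjC, ← ih1]
        ring
    · -- seen component
      intro t
      show (pvStepA st (0 + xs.length, x)).2.1.contains t = _
      unfold pvStepA
      simp only []
      rw [show (st.2.1.add x).contains t = decide (t ∈ PySem.Set.add st.2.1 x) from by
        simp [PySem.Set.contains_iff]]
      have : t ∈ PySem.Set.add st.2.1 x ↔ t ∈ xs ∨ t = x := by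
        rw [PySem.Set.mem_add]
        constructor
        · rintro (h | h)
          · left
            have := ih2 t
            rw [show st.2.1.contains t = true from by
              simpa [PySem.Set.contains_iff] using h] at this
            exact of_decide_eq_true this.symm
          · right; exact h
        · rintro (h | h)
          · left
            have := ih2 t
            rw [decide_eq_true h] at this
            simpa [PySem.Set.contains_iff] using this
          · right; exact h
      simp [this]
    · -- last-index component
      intro t
      show (pvStepA st (0 + xs.length, x)).2.2.get? t = _
      unfold pvStepA
      simp only []
      rw [PySem.Dict.get?_insert, pvIdxs_append]
      by_cases h : t = x
      · subst h; simp
      · rw [if_neg h, if_neg (fun hh => h hh.symm), List.append_nil, ih3 t]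

theorem find_assoc (l : List String) (f : String → List Int) (x : String) :
    List.find? (fun p => p.1 == x) (l.map (fun t => (t, f t)))
      = if x ∈ l then some (x, f x) else none := by
  induction l with
  | nil => simp
  | cons a r ih =>
    simp only [List.map_cons]
    by_cases hax : a = x
    · subst hax
      rw [List.find?_cons_of_pos (by simp), if_pos List.mem_cons_self]
    · rw [List.find?_cons_of_neg (by simp [hax]), ih]
      have hxa : ¬ x = a := fun h => hax h.symm
      by_cases hx : x ∈ r
      · rw [if_pos hx, if_pos (List.mem_cons.mpr (Or.inr hx))]
      · rw [if_neg hx, if_neg (by simp [List.mem_cons, hxa, hx])]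

-- the grouping dict after B's first loop, as an association list over the distinct tools
theorem groups_items (xs : List String) :
    ((PySem.List.enumerate xs 0).foldl pvStepB PySem.Dict.empty).items
      = (PySem.List.dedup xs).map (fun t => (t, pvIdxs xs t)) := by
  induction xs using List.reverseRecOn with
  | nil => simp [PySem.List.enumerate_nil, PySem.Dict.empty, PySem.List.dedup]
  | append_singleton xs x ih =>
    rw [PySem.List.enumerate_append, List.foldl_append, PySem.List.enumerate_cons,
      PySem.List.enumerate_nil]
    set G := (PySem.List.enumerate xs 0).foldl pvStepB PySem.Dict.empty with hG
    simp only [List.foldl_cons, List.foldl_nil]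
    have hcont : G.contains x = decide (x ∈ xs) := by
      rw [PySem.Dict.contains, ih, List.any_map]
      cases hx : decide (x ∈ xs) with
      | true =>
        simp only [decide_eq_true_eq] at hx
        exact List.any_eq_true.mpr ⟨x, (PySem.List.mem_dedup _ _).mpr hx, by simp⟩
      | false =>
        simp only [decide_eq_false_iff_not] at hx
        refine List.any_eq_false.mpr (fun t ht => ?_)
        simp only [Function.comp_apply, beq_eq_false_iff_ne, ne_eq]
        intro h
        have ht' := eq_of_beq h
        subst ht'
        exact hx ((PySem.List.mem_dedup _ _).mp ht)

    have hget : G.get? x = if x ∈ xs then some (pvIdxs xs x) else none := by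
      rw [PySem.Dict.get?, ih, find_assoc]
      by_cases hx : x ∈ xs
      · rw [if_pos ((PySem.List.mem_dedup _ _).mpr hx), if_pos hx]
        rfl
      · rw [if_neg (fun h => hx ((PySem.List.mem_dedup _ _).mp h)), if_neg hx]
        rfl
    show (G.modify x [] (fun l => l ++ [(0 + (xs.length : Int))])).items = _
    rw [PySem.Dict.modify, PySem.Dict.items_insert, hcont]
    by_cases hx : x ∈ xs
    · have hdd : PySem.List.dedup (xs ++ [x]) = PySem.List.dedup xs := by
        rw [dedup_append_singleton, PySem.Set.add]
        simp [PySem.Set.contains_iff, PySem.List.mem_dedup, hx]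
      rw [if_pos (by simp [hx]), ih, List.map_map, hdd]
      apply List.map_congr_left
      intro t ht
      simp only [Function.comp_apply]
      by_cases htx : t = x
      · subst htx
        rw [if_pos (by simp), pvIdxs_append, if_pos rfl,
          PySem.Dict.getD_eq_get?_getD, hget, if_pos hx]
        simp
      · rw [if_neg (by simp [htx]), pvIdxs_append, if_neg (fun h => htx h.symm),
          List.append_nil]
    · have hdd : PySem.List.dedup (xs ++ [x]) = PySem.List.dedup xs ++ [x] := by
        rw [dedup_append_singleton, PySem.Set.add]
        simp [PySem.Set.contains_iff, PySem.List.mem_dedup, hx]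
      rw [if_neg (by simp [hx]), ih, hdd, List.map_append]
      congr 1
      · apply List.map_congr_left
        intro t ht
        have htx : x ≠ t := fun h =>
          hx (by rw [h]; exact (PySem.List.mem_dedup _ _).mp ht)
        rw [pvIdxs_append, if_neg htx, List.append_nil]
      · rw [PySem.Dict.getD_eq_get?_getD, hget, if_neg hx]
        simp only [List.map_cons, List.map_nil, Option.getD_none, List.nil_append]
        rw [pvIdxs_append, if_pos rfl, (pvIdxs_nil_iff xs x).mpr hx]
        simp

theorem alt_eq_sum (sequence : List String) :
    count_backtracking_py_alt sequence
      = ((PySem.List.dedup sequence).map (fun tool => adjC (pvIdxs sequence tool))).sum := by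
  unfold count_backtracking_py_alt
  have hfun : (fun (total : Int) (idxs : List Int) =>
      (idxs.zip (idxs.drop 1)).foldl pvPairStep total)
      = fun total idxs => total + adjC idxs := by
    funext total idxs
    exact zipfold_eq_adjC idxs total
  rw [hfun, PySem.List.foldl_add, PySem.Dict.values, groups_items, List.map_map]
  rw [zero_add, List.map_map]
  exact congrArg List.sum (List.map_congr_left (fun t _ => rfl))

-- ===== VERDICT (by name: the statement is the Claim_ definition above) =====
theorem count_backtracking_py_spec : Claim_equal_count_backtracking_py := by
  intro sequence _
  show count_backtracking_py sequence = count_backtracking_py_alt sequence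
  have h := (mainA sequence).1
  rw [alt_eq_sum, ← h]
  unfold count_backtracking_py
  split
  · rename_i hlen
    match sequence, hlen with
    | [], _ => simp [PySem.List.enumerate_nil]
    | [a], _ =>
      simp [PySem.List.enumerate_cons, PySem.List.enumerate_nil, pvStepA,
        PySem.Set.empty, PySem.Set.contains, PySem.Dict.empty]
  · rfl
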